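-- pv_equiv track=rewrite | github.com/meteor-gogogo/python | data_ctr_to_redis/scripts/ctr_data_to_redis_hour.py | get_discount_price_dict
-- ===== SOURCE A (Python) =====
-- def get_discount_price_dict(es_data, sensors_data, product_dict, ctr_dict):
--     # for row in click_list:
--     #     row_arr = row.split(':')
--     #     is_click = int(row_arr[0])
--     #     discount_price = str(row_arr[7])
--     #     if discount_price == '':
--     #         continue
--     for row in es_data:
--         pid = str(row.split(':')[0])
--         if pid not in product_dict.keys():
--             continue
--         discount_price = str(product_dict[pid]['discount_price'])
--         discount_price_pv_key = 'gbdt:11:' + discount_price + ':pv'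
--         discount_price_pv_value_current = ctr_dict.get(discount_price_pv_key, 0)
--         discount_price_pv_value = 1 + discount_price_pv_value_current
--         ctr_dict.update({discount_price_pv_key: discount_price_pv_value})
--     for row in sensors_data:
--         pid = str(row.split(':')[1])
--         if pid not in product_dict.keys():
--             continue
--         discount_price = str(product_dict[pid]['discount_price'])
--         discount_price_click_key = 'gbdt:11:' + discount_price + ':click'
--         discount_price_click_value_current = ctr_dict.get(discount_price_click_key, 0)
--         discount_price_click_value = 1 + discount_price_click_value_current
--         ctr_dict.update({discount_price_click_key: discount_price_click_value})
--     return ctr_dict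
-- ===== SOURCE B (Python) =====
-- def get_discount_price_dict(es_data, sensors_data, product_dict, ctr_dict):
--     # Extract the event-key streams, then aggregate per DISTINCT key
--     # (first-occurrence order) with list.count -- no incremental counting.
--     pv_keys = ['gbdt:11:' + str(product_dict[r.split(':')[0]]['discount_price']) + ':pv'
--                for r in es_data if r.split(':')[0] in product_dict]
--     click_keys = ['gbdt:11:' + str(product_dict[r.split(':')[1]]['discount_price']) + ':click'
--                   for r in sensors_data if r.split(':')[1] in product_dict]
--     for keys in (pv_keys, click_keys):
--         for k in dict.fromkeys(keys):
--             ctr_dict[k] = ctr_dict.get(k, 0) + keys.count(k)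
--     return ctr_dict
-- ===== Notes on version B (the rewrite author's own statement) =====
-- stated objective: alternative
-- what changed: B abandons A's per-row incremental accumulation entirely: it first extracts the pv and click key streams by comprehension, then for each DISTINCT key (ordered dedupe via dict.fromkeys) writes ctr_dict[k] = ctr_dict.get(k,0) + keys.count(k), i.e. one aggregate count per distinct key instead of one increment per row.
import Mathlib
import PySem

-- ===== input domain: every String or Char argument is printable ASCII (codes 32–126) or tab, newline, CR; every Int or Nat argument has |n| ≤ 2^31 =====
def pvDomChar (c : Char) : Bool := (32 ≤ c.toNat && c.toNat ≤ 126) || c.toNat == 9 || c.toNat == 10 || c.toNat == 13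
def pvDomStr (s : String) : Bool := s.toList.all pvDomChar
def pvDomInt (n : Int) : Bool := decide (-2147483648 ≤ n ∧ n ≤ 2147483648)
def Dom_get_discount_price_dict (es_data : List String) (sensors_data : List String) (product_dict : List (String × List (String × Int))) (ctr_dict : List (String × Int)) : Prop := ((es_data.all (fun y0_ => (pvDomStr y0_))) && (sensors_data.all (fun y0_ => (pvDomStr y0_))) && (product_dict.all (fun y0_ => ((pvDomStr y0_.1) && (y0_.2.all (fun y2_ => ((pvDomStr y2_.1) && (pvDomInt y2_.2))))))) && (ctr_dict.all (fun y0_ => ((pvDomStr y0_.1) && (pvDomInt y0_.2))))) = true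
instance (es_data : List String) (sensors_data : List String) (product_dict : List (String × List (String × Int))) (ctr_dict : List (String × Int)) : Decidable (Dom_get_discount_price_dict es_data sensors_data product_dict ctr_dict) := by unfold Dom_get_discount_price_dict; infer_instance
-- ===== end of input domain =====

-- B replaces A's per-row incremental accumulation by extracting the key streams and writing one
-- aggregate count per distinct key (objective: alternative); both mutate/return the same
-- ctr_dict, and the equivalence proved here is about the returned value.

-- ===== PORT A =====
-- shared decoding of the product_dict parameter (a Python dict of dicts)
def pvProductDict (product_dict : List (String × List (String × Int))) :
    PySem.Dict String (PySem.Dict String Int) :=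
  PySem.Dict.ofList (product_dict.map (fun p => (p.1, PySem.Dict.ofList p.2)))

-- body of A's first loop (one es_data row)
def pvStepPvA (pd : PySem.Dict String (PySem.Dict String Int)) (d : PySem.Dict String Int)
    (row : String) : PySem.Dict String Int :=
  match PySem.List.pyGet? ((PySem.Str.split? row ":").getD []) 0 with
  | none => d              -- unreachable: split always has an element 0
  | some pid =>
    if pd.contains pid then
      match (pd.getD pid PySem.Dict.empty).get? "discount_price" with
      | none => d          -- Python raises KeyError here; excluded by Pre_
      | some dp =>
        let key := "gbdt:11:" ++ PySem.Int.toStr dp ++ ":pv"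
        let cur := d.getD key 0
        d.insert key (1 + cur)
    else d

-- body of A's second loop (one sensors_data row)
def pvStepClickA (pd : PySem.Dict String (PySem.Dict String Int)) (d : PySem.Dict String Int)
    (row : String) : PySem.Dict String Int :=
  match PySem.List.pyGet? ((PySem.Str.split? row ":").getD []) 1 with
  | none => d              -- Python raises IndexError here; excluded by Pre_
  | some pid =>
    if pd.contains pid then
      match (pd.getD pid PySem.Dict.empty).get? "discount_price" with
      | none => d          -- Python raises KeyError here; excluded by Pre_
      | some dp =>
        let key := "gbdt:11:" ++ PySem.Int.toStr dp ++ ":click"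
        let cur := d.getD key 0
        d.insert key (1 + cur)
    else d

def get_discount_price_dict (es_data : List String) (sensors_data : List String) (product_dict : List (String × List (String × Int))) (ctr_dict : List (String × Int)) : List (String × Int) :=
  (sensors_data.foldl (pvStepClickA (pvProductDict product_dict))
    (es_data.foldl (pvStepPvA (pvProductDict product_dict))
      (PySem.Dict.ofList ctr_dict))).items

-- ===== PORT B =====
-- one element of Source B's key-stream comprehension (the 'if pid in product_dict' filter plus
-- the key expression; none also where Python would raise, excluded by Pre_)
def pvKeyB (pd : PySem.Dict String (PySem.Dict String Int)) (i : Int) (suffix : String)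
    (row : String) : Option String :=
  match PySem.List.pyGet? ((PySem.Str.split? row ":").getD []) i with
  | none => none           -- Python raises IndexError here; excluded by Pre_
  | some pid =>
    if pd.contains pid then
      match (pd.getD pid PySem.Dict.empty).get? "discount_price" with
      | none => none       -- Python raises KeyError here; excluded by Pre_
      | some dp => some ("gbdt:11:" ++ PySem.Int.toStr dp ++ suffix)
    else none

-- Source B's inner loop: for each distinct key of the stream (dict.fromkeys order),
-- ctr[k] = ctr.get(k, 0) + keys.count(k)
def pvAggregate (keys : List String) (d : PySem.Dict String Int) : PySem.Dict String Int :=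
  (PySem.List.dedup keys).foldl
    (fun d k => d.insert k (d.getD k 0 + (keys.count k : Int))) d

def get_discount_price_dict_alt (es_data : List String) (sensors_data : List String) (product_dict : List (String × List (String × Int))) (ctr_dict : List (String × Int)) : List (String × Int) :=
  let pd := pvProductDict product_dict
  let pv_keys := es_data.filterMap (pvKeyB pd 0 ":pv")
  let click_keys := sensors_data.filterMap (pvKeyB pd 1 ":click")
  (pvAggregate click_keys (pvAggregate pv_keys (PySem.Dict.ofList ctr_dict))).items

-- ===== PRECONDITION & SPEC =====
-- helper: the product entry looked up for this pid (if any) carries the key 'discount_price'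
def pvRowOk (product_dict : List (String × List (String × Int))) (pid : String) : Bool :=
  match (pvProductDict product_dict).get? pid with
  | none => true
  | some info => info.contains "discount_price"

-- Pre_ excludes exactly the inputs on which Python A raises: a sensors row without ':'
-- (IndexError on split[1]) or a looked-up product entry lacking 'discount_price' (KeyError).
def Pre_get_discount_price_dict (es_data : List String) (sensors_data : List String) (product_dict : List (String × List (String × Int))) (ctr_dict : List (String × Int)) : Prop :=
  (sensors_data.all (fun row => decide (2 ≤ ((PySem.Str.split? row ":").getD []).length))
   && es_data.all (fun row => pvRowOk product_dict (((PySem.Str.split? row ":").getD []).getD 0 ""))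
   && sensors_data.all (fun row => pvRowOk product_dict (((PySem.Str.split? row ":").getD []).getD 1 ""))) = true
instance (es_data : List String) (sensors_data : List String) (product_dict : List (String × List (String × Int))) (ctr_dict : List (String × Int)) : Decidable (Pre_get_discount_price_dict es_data sensors_data product_dict ctr_dict) := by unfold Pre_get_discount_price_dict; infer_instance

def pvWitness_get_discount_price_dict : List String × List String × (List (String × List (String × Int))) × (List (String × Int)) :=
  (["p1:3", "p2:0"], ["7:p1"], [("p1", [("discount_price", 5)])], [("gbdt:11:5:pv", 2)])

def Spec_get_discount_price_dict (es_data : List String) (sensors_data : List String) (product_dict : List (String × List (String × Int))) (ctr_dict : List (String × Int)) (out : List (String × Int)) : Prop := out = get_discount_price_dict_alt es_data sensors_data product_dict ctr_dict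
instance (es_data : List String) (sensors_data : List String) (product_dict : List (String × List (String × Int))) (ctr_dict : List (String × Int)) (out : List (String × Int)) : Decidable (Spec_get_discount_price_dict es_data sensors_data product_dict ctr_dict out) := by unfold Spec_get_discount_price_dict; infer_instance

-- ===== CLAIM (what is proved, stated in full; the proofs are below) =====
def Claim_equal_get_discount_price_dict : Prop := ∀ (es_data : List String) (sensors_data : List String) (product_dict : List (String × List (String × Int))) (ctr_dict : List (String × Int)), Dom_get_discount_price_dict es_data sensors_data product_dict ctr_dict → Pre_get_discount_price_dict es_data sensors_data product_dict ctr_dict → Spec_get_discount_price_dict es_data sensors_data product_dict ctr_dict (get_discount_price_dict es_data sensors_data product_dict ctr_dict)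

-- ===== LEMMAS AND PROOFS =====

-- the key A computes for one row (index i, given suffix), as an Option
def pvKeyA (pd : PySem.Dict String (PySem.Dict String Int)) (i : Int) (suffix : String) (row : String) : Option String :=
  match PySem.List.pyGet? ((PySem.Str.split? row ":").getD []) i with
  | none => none
  | some pid =>
    if pd.contains pid then
      match (pd.getD pid PySem.Dict.empty).get? "discount_price" with
      | none => none
      | some dp => some ("gbdt:11:" ++ PySem.Int.toStr dp ++ suffix)
    else none

def pvBumps {κ : Type} [BEq κ] (d : PySem.Dict κ Int) (ks : List κ) : PySem.Dict κ Int :=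
  ks.foldl (fun d k => d.insert k (1 + d.getD k 0)) d

def pvMerge {κ : Type} [BEq κ] (d : PySem.Dict κ Int) (l : List (κ × Int)) : PySem.Dict κ Int :=
  l.foldl (fun d p => d.insert p.1 (d.getD p.1 0 + p.2)) d

theorem pvMerge_cons {κ : Type} [BEq κ] (d : PySem.Dict κ Int) (p : κ × Int) (t : List (κ × Int)) :
    pvMerge d (p :: t) = pvMerge (d.insert p.1 (d.getD p.1 0 + p.2)) t := rfl

theorem pv_foldl_step {α κ β : Type} (rows : List α) (key : α → Option κ) (f : β → κ → β)
    (body : β → α → β) (h : ∀ b r, body b r = (key r).elim b (f b)) (b : β) :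
    rows.foldl body b = (rows.filterMap key).foldl f b := by
  induction rows generalizing b with
  | nil => rfl
  | cons r rows ih =>
    rw [List.foldl_cons, h]
    rcases hk : key r with _ | k <;> simp [hk, ih]

theorem pvStepPvA_eq (pd : PySem.Dict String (PySem.Dict String Int))
    (d : PySem.Dict String Int) (row : String) :
    pvStepPvA pd d row = (pvKeyA pd 0 ":pv" row).elim d (fun k => d.insert k (1 + d.getD k 0)) := by
  unfold pvStepPvA pvKeyA
  cases PySem.List.pyGet? ((PySem.Str.split? row ":").getD []) 0 with
  | none => rfl
  | some pid =>
    by_cases hc : pd.contains pid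
    · simp only [hc, if_true]
      cases (pd.getD pid PySem.Dict.empty).get? "discount_price" <;> rfl
    · simp only [Bool.not_eq_true] at hc
      simp [hc]

theorem pvStepClickA_eq (pd : PySem.Dict String (PySem.Dict String Int))
    (d : PySem.Dict String Int) (row : String) :
    pvStepClickA pd d row = (pvKeyA pd 1 ":click" row).elim d (fun k => d.insert k (1 + d.getD k 0)) := by
  unfold pvStepClickA pvKeyA
  cases PySem.List.pyGet? ((PySem.Str.split? row ":").getD []) 1 with
  | none => rfl
  | some pid =>
    by_cases hc : pd.contains pid
    · simp only [hc, if_true]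
      cases (pd.getD pid PySem.Dict.empty).get? "discount_price" <;> rfl
    · simp only [Bool.not_eq_true] at hc
      simp [hc]

theorem pvKeyB_eq_pvKeyA (pd : PySem.Dict String (PySem.Dict String Int)) (i : Int)
    (suffix : String) (row : String) : pvKeyB pd i suffix row = pvKeyA pd i suffix row := rfl

theorem pv_insert_comm {κ ν : Type} [BEq κ] [LawfulBEq κ] (e : PySem.Dict κ ν) (k j : κ) (w x : ν)
    (hk : e.contains k = true) (hj : j ≠ k) :
    (e.insert k w).insert j x = (e.insert j x).insert k w := by
  apply PySem.Dict.ext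
  cases hje : e.contains j with
  | false =>
    rw [PySem.Dict.items_insert_of_not_contains _ x
        (by rw [PySem.Dict.contains_insert]; simp [hj, hje]),
      PySem.Dict.items_insert_of_contains _ w hk,
      PySem.Dict.items_insert_of_contains _ w
        (by rw [PySem.Dict.contains_insert]; simp [hk]),
      PySem.Dict.items_insert_of_not_contains _ x hje,
      List.map_append]
    simp [hj]
  | true =>
    rw [PySem.Dict.items_insert_of_contains _ x
        (by rw [PySem.Dict.contains_insert]; simp [hje]),
      PySem.Dict.items_insert_of_contains _ w hk,
      PySem.Dict.items_insert_of_contains _ w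
        (by rw [PySem.Dict.contains_insert]; simp [hk]),
      PySem.Dict.items_insert_of_contains _ x hje,
      List.map_map, List.map_map]
    apply List.map_congr_left
    intro p _
    by_cases h1 : p.1 = k <;> by_cases h2 : p.1 = j <;>
      simp_all [Function.comp, Ne.symm hj]

theorem pv_merge_getD {κ : Type} [BEq κ] [LawfulBEq κ] (t : List (κ × Int)) (k : κ)
    (ht : ∀ p ∈ t, p.1 ≠ k) (e : PySem.Dict κ Int) : (pvMerge e t).getD k 0 = e.getD k 0 := by
  induction t generalizing e with
  | nil => rfl
  | cons p t ih =>
    rw [pvMerge_cons]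
    rw [ih (fun q hq => ht q (List.mem_cons_of_mem _ hq)),
      PySem.Dict.getD_insert_of_ne _ _ _ (Ne.symm (ht p (List.mem_cons_self)))]

theorem pv_merge_insert {κ : Type} [BEq κ] [LawfulBEq κ] (t : List (κ × Int)) (k : κ)
    (ht : ∀ p ∈ t, p.1 ≠ k) (e : PySem.Dict κ Int) (w' : Int) (hk : e.contains k = true) :
    (pvMerge e t).insert k w' = pvMerge (e.insert k w') t := by
  induction t generalizing e with
  | nil => rfl
  | cons p t ih =>
    have hj : p.1 ≠ k := ht p List.mem_cons_self
    rw [pvMerge_cons, pvMerge_cons]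
    rw [ih (fun q hq => ht q (List.mem_cons_of_mem _ hq)) _
        (by rw [PySem.Dict.contains_insert]; simp [hk]),
      PySem.Dict.getD_insert_of_ne _ _ _ hj,
      pv_insert_comm e k p.1 w' _ hk hj]

theorem pv_map_bump_id {κ : Type} [BEq κ] [LawfulBEq κ] (t : List (κ × Int)) (k : κ)
    (ht : ∀ p ∈ t, p.1 ≠ k) :
    t.map (fun p => if p.1 == k then (p.1, p.2 + 1) else p) = t := by
  have h : ∀ p ∈ t, (fun p : κ × Int => if p.1 == k then (p.1, p.2 + 1) else p) p = id p := by
    intro p hp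
    simp [ht p hp]
  rw [List.map_congr_left h, List.map_id]

theorem pv_merge_bump {κ : Type} [BEq κ] [LawfulBEq κ] (l : List (κ × Int)) (k : κ)
    (hnd : (l.map Prod.fst).Nodup) (hk : k ∈ l.map Prod.fst) (d : PySem.Dict κ Int) :
    pvMerge d (l.map (fun p => if p.1 == k then (p.1, p.2 + 1) else p))
      = (pvMerge d l).insert k (1 + (pvMerge d l).getD k 0) := by
  induction l generalizing d with
  | nil => simp at hk
  | cons p t ih =>
    rcases p with ⟨j, v⟩
    by_cases hj : j = k
    · subst hj
      have hnt : ∀ q ∈ t, q.1 ≠ j := by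
        intro q hq h
        exact (List.nodup_cons.mp hnd).1 (List.mem_map.mpr ⟨q, hq, h⟩)
      simp only [List.map_cons, BEq.rfl, if_true]
      rw [pv_map_bump_id t j hnt, pvMerge_cons, pvMerge_cons,
        pv_merge_getD t j hnt, PySem.Dict.getD_insert_self,
        pv_merge_insert t j hnt _ _ (PySem.Dict.contains_insert_self _ _ _),
        PySem.Dict.insert_insert_self]
      have : d.getD j 0 + (v + 1) = 1 + (d.getD j 0 + v) := by ring
      rw [this]
    · have hbj : (j == k) = false := by simp [hj]
      have hk' : k ∈ t.map Prod.fst := by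
        rcases List.mem_cons.mp hk with h | h
        · exact absurd h.symm hj
        · exact h
      simp only [List.map_cons, hbj]
      rw [pvMerge_cons, pvMerge_cons]
      exact ih (List.nodup_cons.mp hnd).2 hk' _

theorem pvMerge_append {κ : Type} [BEq κ] (d : PySem.Dict κ Int) (l1 l2 : List (κ × Int)) :
    pvMerge d (l1 ++ l2) = pvMerge (pvMerge d l1) l2 := by
  simp [pvMerge, List.foldl_append]

theorem pvBumps_append {κ : Type} [BEq κ] (d : PySem.Dict κ Int) (l1 l2 : List κ) :
    pvBumps d (l1 ++ l2) = pvBumps (pvBumps d l1) l2 := by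
  simp [pvBumps, List.foldl_append]

theorem pv_bumps_eq_merge {κ : Type} [BEq κ] [LawfulBEq κ] (ks : List κ) (d : PySem.Dict κ Int) :
    pvBumps d ks = pvMerge d (PySem.Dict.counter ks).items := by
  induction ks using List.reverseRecOn generalizing d with
  | nil => rfl
  | append_singleton ks k ih =>
    rw [pvBumps_append, ih, PySem.Dict.counter_append_singleton]
    have hsingle : pvBumps (pvMerge d (PySem.Dict.counter ks).items) [k]
        = (pvMerge d (PySem.Dict.counter ks).items).insert k
            (1 + (pvMerge d (PySem.Dict.counter ks).items).getD k 0) := rfl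
    rw [hsingle]
    cases hc : (PySem.Dict.counter ks).contains k with
    | false =>
      have h1 : (PySem.Dict.counter ks).modify k 0 (fun x => x + 1)
          = (PySem.Dict.counter ks).insert k (0 + 1) := by
        show (PySem.Dict.counter ks).insert k ((PySem.Dict.counter ks).getD k 0 + 1) = _
        rw [PySem.Dict.getD_of_not_contains _ _ hc]
      have h2 : pvMerge d ((PySem.Dict.counter ks).insert k (0 + 1)).items
          = pvMerge (pvMerge d (PySem.Dict.counter ks).items) [(k, 0 + 1)] := by
        rw [PySem.Dict.items_insert_of_not_contains _ _ hc, pvMerge_append]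
      have h3 : pvMerge (pvMerge d (PySem.Dict.counter ks).items) [(k, 0 + 1)]
          = (pvMerge d (PySem.Dict.counter ks).items).insert k
              ((pvMerge d (PySem.Dict.counter ks).items).getD k 0 + (0 + 1)) := rfl
      rw [h1, h2, h3]
      congr 1
      ring
    | true =>
      have h1 : (PySem.Dict.counter ks).modify k 0 (fun x => x + 1)
          = (PySem.Dict.counter ks).insert k ((PySem.Dict.counter ks).getD k 0 + 1) := rfl
      have h2 : pvMerge d ((PySem.Dict.counter ks).insert k
              ((PySem.Dict.counter ks).getD k 0 + 1)).items
          = pvMerge d ((PySem.Dict.counter ks).items.map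
              (fun p => if p.1 == k then (k, (PySem.Dict.counter ks).getD k 0 + 1) else p)) := by
        rw [PySem.Dict.items_insert_of_contains _ _ hc]
      have hnd : ((PySem.Dict.counter ks).items.map Prod.fst).Nodup :=
        PySem.Dict.nodup_keys_counter ks
      have hmem : k ∈ (PySem.Dict.counter ks).items.map Prod.fst :=
        (PySem.Dict.contains_iff_mem_keys _ _).mp hc
      have hmapeq : (PySem.Dict.counter ks).items.map
            (fun p => if p.1 == k then (k, (PySem.Dict.counter ks).getD k 0 + 1) else p)
          = (PySem.Dict.counter ks).items.map
            (fun p => if p.1 == k then (p.1, p.2 + 1) else p) := by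
        apply List.map_congr_left
        intro p hp
        by_cases h1 : p.1 = k
        · have hp' : (p.1, p.2) ∈ (PySem.Dict.counter ks).items := by simpa using hp
          have hval : (PySem.Dict.counter ks).getD p.1 0 = p.2 :=
            PySem.Dict.getD_of_mem_items _ hp' (PySem.Dict.nodup_keys_counter ks) 0
          simp only [h1, beq_self_eq_true, if_true]
          rw [← h1, hval]
        · simp [h1]
      rw [h1, h2, hmapeq, pv_merge_bump _ k hnd hmem d]

-- B's per-distinct-key aggregation is the merge of Counter(keys).items
theorem pvAggregate_eq_merge (keys : List String) (d : PySem.Dict String Int) :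
    pvAggregate keys d = pvMerge d (PySem.Dict.counter keys).items := by
  unfold pvAggregate pvMerge
  rw [PySem.Dict.items_counter, List.foldl_map, PySem.List.dedup_eq_ofList]

theorem pvA_eq (es_data : List String) (sensors_data : List String)
    (product_dict : List (String × List (String × Int))) (ctr_dict : List (String × Int)) :
    get_discount_price_dict es_data sensors_data product_dict ctr_dict =
      (pvBumps (pvBumps (PySem.Dict.ofList ctr_dict)
          (es_data.filterMap (pvKeyA (pvProductDict product_dict) 0 ":pv")))
        (sensors_data.filterMap (pvKeyA (pvProductDict product_dict) 1 ":click"))).items := by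
  unfold get_discount_price_dict
  rw [pv_foldl_step es_data (pvKeyA (pvProductDict product_dict) 0 ":pv")
      (fun d k => d.insert k (1 + d.getD k 0)) (pvStepPvA (pvProductDict product_dict))
      (pvStepPvA_eq (pvProductDict product_dict)) (PySem.Dict.ofList ctr_dict),
    pv_foldl_step sensors_data (pvKeyA (pvProductDict product_dict) 1 ":click")
      (fun d k => d.insert k (1 + d.getD k 0)) (pvStepClickA (pvProductDict product_dict))
      (pvStepClickA_eq (pvProductDict product_dict)) _]
  rfl

theorem pvB_eq (es_data : List String) (sensors_data : List String)
    (product_dict : List (String × List (String × Int))) (ctr_dict : List (String × Int)) :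
    get_discount_price_dict_alt es_data sensors_data product_dict ctr_dict =
      (pvMerge (pvMerge (PySem.Dict.ofList ctr_dict)
          (PySem.Dict.counter
            (es_data.filterMap (pvKeyA (pvProductDict product_dict) 0 ":pv"))).items)
        (PySem.Dict.counter
          (sensors_data.filterMap (pvKeyA (pvProductDict product_dict) 1 ":click"))).items).items := by
  unfold get_discount_price_dict_alt
  simp only [pvKeyB_eq_pvKeyA, pvAggregate_eq_merge]

-- ===== VERDICT (by name: the statement is the Claim_ definition above) =====
theorem get_discount_price_dict_spec : Claim_equal_get_discount_price_dict := by
  intro es_data sensors_data product_dict ctr_dict _ _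
  unfold Spec_get_discount_price_dict
  rw [pvA_eq, pvB_eq, pv_bumps_eq_merge, pv_bumps_eq_merge]
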